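-- pv_equiv track=rewrite | github.com/SickanK/advent-of-code | 2020/day20.py | getLengthInDir
-- ===== SOURCE A (Python) =====
-- def getLengthInDir(info, total, ids, start, direction):
--     nextBlock = ""
--     t = total
--     for i in ids[start]:
--         if(i[1] == direction):
--             nextBlock = i[0]
--
--     if(len(nextBlock) > 0):
--         t += 1
--         return getLengthInDir(info, t, ids, nextBlock, direction)
--     return t
-- ===== SOURCE B (Python) =====
-- def getLengthInDir(info, total, ids, start, direction):
--     succ = {}
--     for key, pairs in ids.items():
--         nxt = ""
--         for a, b in pairs:
--             if b == direction:
--                 nxt = a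
--         succ[key] = nxt
--     t = total
--     cur = start
--     while True:
--         nb = succ[cur]
--         if nb == "":
--             return t
--         t += 1
--         cur = nb
-- ===== Notes on version B (the rewrite author's own statement) =====
-- stated objective: alternative
-- what changed: B precomputes a successor map (last pair matching the direction per key) in one pass over the dict and then walks the chain with an iterative while-loop accumulator, instead of A's recursion that rescans ids[start] at every call.
import Mathlib
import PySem

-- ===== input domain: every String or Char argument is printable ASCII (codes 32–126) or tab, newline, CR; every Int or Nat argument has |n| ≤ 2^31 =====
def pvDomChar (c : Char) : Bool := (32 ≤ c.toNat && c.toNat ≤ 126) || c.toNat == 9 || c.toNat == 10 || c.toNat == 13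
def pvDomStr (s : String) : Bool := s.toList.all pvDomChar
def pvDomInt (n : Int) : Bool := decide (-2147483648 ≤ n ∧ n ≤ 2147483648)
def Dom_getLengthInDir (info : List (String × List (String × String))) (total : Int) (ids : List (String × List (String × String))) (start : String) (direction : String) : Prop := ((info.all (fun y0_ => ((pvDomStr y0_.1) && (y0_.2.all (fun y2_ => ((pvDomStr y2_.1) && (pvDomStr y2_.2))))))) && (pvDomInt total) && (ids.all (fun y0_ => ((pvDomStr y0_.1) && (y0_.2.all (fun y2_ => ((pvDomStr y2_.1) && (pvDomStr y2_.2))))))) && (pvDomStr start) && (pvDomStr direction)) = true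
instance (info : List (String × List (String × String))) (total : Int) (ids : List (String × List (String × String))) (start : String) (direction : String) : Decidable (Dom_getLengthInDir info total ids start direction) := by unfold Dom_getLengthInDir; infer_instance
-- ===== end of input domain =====

-- B replaces A's recursion (which rescans ids[cur] each call) by a one-pass precomputed
-- successor map followed by an iterative walk; equivalence of RETURN values on Pre_.

-- ===== PORT A =====
-- A's recursion, with fuel ids.length + 1 (enough for every terminating chain; Pre_ holds
-- exactly on inputs where the Python returns, and there the fuel is never exhausted).
def pvGoA (ids : List (String × List (String × String))) (direction : String) :
    Nat → Int → String → Int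
  | 0, t, _ => t
  | fuel + 1, t, start =>
    match ids.find? (fun p => p.1 == start) with    -- ids[start]; none = KeyError, outside Pre_
    | none => t
    | some p =>
      let nextBlock := p.2.foldl (fun nb i => if i.2 == direction then i.1 else nb) ""
      if PySem.Str.len nextBlock > 0 then pvGoA ids direction fuel (t + 1) nextBlock else t

def getLengthInDir (info : List (String × List (String × String))) (total : Int) (ids : List (String × List (String × String))) (start : String) (direction : String) : Int :=
  pvGoA ids direction (ids.length + 1) total start

-- ===== PORT B =====
-- inner loop of Source B: last pair whose second component equals direction, else ""
def pvNextOf (direction : String) (pairs : List (String × String)) : String :=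
  pairs.foldl (fun nb i => if i.2 == direction then i.1 else nb) ""

-- succ = {key: last match per key}, built in one pass over ids
def pvSucc (ids : List (String × List (String × String))) (direction : String) :
    PySem.Dict String String :=
  ids.foldl (fun d kv => d.insert kv.1 (pvNextOf direction kv.2)) PySem.Dict.empty

-- the while-True walk of Source B, with the same fuel convention as port A
def pvWalk (succ : PySem.Dict String String) : Nat → Int → String → Int
  | 0, t, _ => t
  | fuel + 1, t, cur =>
    match succ.get? cur with    -- succ[cur]; none = KeyError, outside Pre_
    | none => t
    | some nb => if nb == "" then t else pvWalk succ fuel (t + 1) nb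

def getLengthInDir_alt (info : List (String × List (String × String))) (total : Int) (ids : List (String × List (String × String))) (start : String) (direction : String) : Int :=
  pvWalk (pvSucc ids direction) (ids.length + 1) total start

-- ===== PRECONDITION & SPEC =====
-- the successor map as a single step on Option String: none once a key is missing,
-- otherwise the last pair of ids[k] matching the direction (possibly "")
def pvStep (ids : List (String × List (String × String))) (direction : String) :
    Option String → Option String
  | none => none
  | some k =>
    match ids.find? (fun p => p.1 == k) with
    | none => none
    | some p => some (pvNextOf direction p.2)

-- Pre_: ids is a genuine dict (no duplicate keys — a Python dict cannot have any), and in the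
-- successor graph the terminal "" is reachable from start in at most ids.length steps
-- (otherwise the Python A raises KeyError or recurses forever; a terminating chain visits
-- distinct keys of ids, so ids.length steps always suffice — Pre_ is exact).
def Pre_getLengthInDir (info : List (String × List (String × String))) (total : Int) (ids : List (String × List (String × String))) (start : String) (direction : String) : Prop :=
  (ids.map (·.1)).Nodup ∧
  ∃ n ∈ Finset.Icc 1 ids.length, (pvStep ids direction)^[n] (some start) = some ""
instance (info : List (String × List (String × String))) (total : Int) (ids : List (String × List (String × String))) (start : String) (direction : String) : Decidable (Pre_getLengthInDir info total ids start direction) := by unfold Pre_getLengthInDir; infer_instance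

def pvWitness_getLengthInDir : (List (String × List (String × String))) × Int × (List (String × List (String × String))) × String × String :=
  ([], 5, [("a", [("b", "r")]), ("b", [])], "a", "r")

def Spec_getLengthInDir (info : List (String × List (String × String))) (total : Int) (ids : List (String × List (String × String))) (start : String) (direction : String) (out : Int) : Prop := out = getLengthInDir_alt info total ids start direction
instance (info : List (String × List (String × String))) (total : Int) (ids : List (String × List (String × String))) (start : String) (direction : String) (out : Int) : Decidable (Spec_getLengthInDir info total ids start direction out) := by unfold Spec_getLengthInDir; infer_instance

-- ===== CLAIM (what is proved, stated in full; the proofs are below) =====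
def Claim_equal_getLengthInDir : Prop := ∀ (info : List (String × List (String × String))) (total : Int) (ids : List (String × List (String × String))) (start : String) (direction : String), Dom_getLengthInDir info total ids start direction → Pre_getLengthInDir info total ids start direction → Spec_getLengthInDir info total ids start direction (getLengthInDir info total ids start direction)

-- ===== LEMMAS AND PROOFS =====

-- lookup in the precomputed successor map = (first-match) lookup in ids followed by pvNextOf
lemma get?_pvSucc_aux (direction : String) :
    ∀ (ids : List (String × List (String × String))) (d : PySem.Dict String String)
      (k : String), (ids.map (·.1)).Nodup →
      (ids.foldl (fun d kv => d.insert kv.1 (pvNextOf direction kv.2)) d).get? k =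
        (match ids.find? (fun p => p.1 == k) with
         | some p => some (pvNextOf direction p.2)
         | none => d.get? k) := by
  intro ids
  induction ids with
  | nil => intro d k _; simp
  | cons hd tl ih =>
    intro d k hnd
    simp only [List.map_cons, List.nodup_cons] at hnd
    simp only [List.foldl_cons, List.find?_cons]
    by_cases hk : hd.1 = k
    · subst hk
      rw [ih _ _ hnd.2]
      have : tl.find? (fun p => p.1 == hd.1) = none := by
        apply List.find?_eq_none.2
        intro p hp
        simp only [beq_iff_eq]
        intro h
        exact hnd.1 (h ▸ List.mem_map_of_mem hp)
      simp [this]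
    · rw [ih _ _ hnd.2]
      have hne : (hd.1 == k) = false := by simp [hk]
      simp only [hne]
      cases tl.find? (fun p => p.1 == k) with
      | some p => rfl
      | none =>
        simp only [PySem.Dict.get?_insert]
        rw [if_neg (fun h => hk h.symm)]

lemma len_pos_iff (s : String) : (PySem.Str.len s > 0) ↔ ¬ (s == "") = true := by
  simp only [PySem.Str.len]
  constructor
  · intro h he
    rw [beq_iff_eq] at he; subst he; simp at h
  · intro h
    rw [beq_iff_eq] at h
    have hne : s.toList ≠ [] := fun he => h (by cases s; simp_all)
    exact_mod_cast List.length_pos_iff.2 hne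

lemma pvStep_none (ids : List (String × List (String × String))) (direction : String)
    (m : Nat) : (pvStep ids direction)^[m] none = none :=
  Function.iterate_fixed rfl m

lemma walk_eq (ids : List (String × List (String × String))) (direction : String)
    (hnd : (ids.map (·.1)).Nodup) :
    ∀ (n fuel : Nat) (t : Int) (k : String), 1 ≤ n → n ≤ fuel →
      (pvStep ids direction)^[n] (some k) = some "" →
      pvGoA ids direction fuel t k = pvWalk (pvSucc ids direction) fuel t k := by
  intro n
  induction n with
  | zero => intro fuel t k h1; omega
  | succ m ih =>
    intro fuel t k _ hle hit
    cases fuel with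
    | zero => omega
    | succ f =>
      rw [Function.iterate_succ_apply] at hit
      simp only [pvGoA, pvWalk, pvSucc, get?_pvSucc_aux direction ids PySem.Dict.empty k hnd]
      cases hf : ids.find? (fun p => p.1 == k) with
      | none =>
        rw [show pvStep ids direction (some k) = none by simp [pvStep, hf],
            pvStep_none] at hit
        exact absurd hit (by simp)
      | some p =>
        rw [show pvStep ids direction (some k) = some (pvNextOf direction p.2) by
              simp [pvStep, hf]] at hit
        simp only [hf]
        have hfold : p.2.foldl (fun nb i => if i.2 == direction then i.1 else nb) ""
            = pvNextOf direction p.2 := rfl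
        rw [hfold]
        by_cases hnb : (pvNextOf direction p.2 == "") = true
        · rw [if_neg (fun hl => ((len_pos_iff _).1 hl) hnb), if_pos hnb]
        · have hm : 1 ≤ m := by
            rcases Nat.eq_zero_or_pos m with h0 | h
            · subst h0
              simp only [Function.iterate_zero, id_eq, Option.some.injEq] at hit
              exact absurd (by simp [hit]) hnb
            · exact h
          rw [if_pos ((len_pos_iff _).2 hnb), if_neg hnb]
          exact ih f (t + 1) _ hm (by omega) hit

-- ===== VERDICT (by name: the statement is the Claim_ definition above) =====
theorem getLengthInDir_spec : Claim_equal_getLengthInDir := by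
  intro info total ids start direction _ hpre
  unfold Spec_getLengthInDir getLengthInDir getLengthInDir_alt
  obtain ⟨hnd, n, hn, hit⟩ := hpre
  simp only [Finset.mem_Icc] at hn
  exact walk_eq ids direction hnd n (ids.length + 1) total start hn.1 (by omega) hit
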